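-- pv_equiv track=rewrite | github.com/gabrielkordzadze/GOA | day 81/classwork/classwork81.py | flick_switch
-- ===== SOURCE A (Python) =====
-- def flick_switch(lst):
--     result = []
--     state = True
--     for item in lst:
--         if item == 'flick':
--             state = not state
--         result.append(state)
--     return result
-- ===== SOURCE B (Python) =====
-- import itertools, operator
--
-- def flick_switch(lst):
--     flags = [item == 'flick' for item in lst]
--     return list(itertools.accumulate(itertools.chain([True], flags), operator.xor))[1:]
-- ===== Notes on version B (the rewrite author's own statement) =====
-- stated objective: idiomatic
-- what changed: Replaces the explicit toggle-and-append loop with a flag-list transform followed by a running-XOR prefix scan (itertools.accumulate) seeded with True, dropping the seed.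
import Mathlib
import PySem

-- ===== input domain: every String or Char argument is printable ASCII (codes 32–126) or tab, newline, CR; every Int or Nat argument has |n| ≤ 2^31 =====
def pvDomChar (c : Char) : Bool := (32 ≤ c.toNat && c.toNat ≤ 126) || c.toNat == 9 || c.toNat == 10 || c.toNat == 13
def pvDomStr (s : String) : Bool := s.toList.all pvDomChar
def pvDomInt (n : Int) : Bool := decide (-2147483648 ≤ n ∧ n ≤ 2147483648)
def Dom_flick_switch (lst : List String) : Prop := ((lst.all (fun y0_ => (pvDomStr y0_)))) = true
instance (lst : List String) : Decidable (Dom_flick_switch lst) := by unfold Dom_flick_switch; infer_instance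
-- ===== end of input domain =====

-- ===== PORT A =====
-- B rewrites the toggle loop as flag-map + running-XOR prefix scan (idiomatic pipeline); same O(n) cost.
def flickLoop (state : Bool) : List String → List Bool
  | [] => []
  | item :: rest =>
    let s := if item == "flick" then !state else state
    s :: flickLoop s rest

def flick_switch (lst : List String) : List Bool := flickLoop true lst

-- ===== PORT B =====
def flick_switch_alt (lst : List String) : List Bool :=
  ((lst.map (fun item => item == "flick")).scanl (fun s f => xor s f) true).tail

-- ===== PRECONDITION & SPEC =====
def Spec_flick_switch (lst : List String) (out : List Bool) : Prop := out = flick_switch_alt lst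
instance (lst : List String) (out : List Bool) : Decidable (Spec_flick_switch lst out) := by unfold Spec_flick_switch; infer_instance

-- ===== CLAIM (what is proved, stated in full; the proofs are below) =====
def Claim_equal_flick_switch : Prop := ∀ (lst : List String), Dom_flick_switch lst → Spec_flick_switch lst (flick_switch lst)

-- ===== LEMMAS AND PROOFS =====

-- ===== VERDICT (by name: the statement is the Claim_ definition above) =====
theorem scan_eq_loop (state : Bool) (lst : List String) :
    ((lst.map (fun item => item == "flick")).scanl (fun s f => xor s f) state).tail
      = flickLoop state lst := by
  induction lst generalizing state with
  | nil => rfl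
  | cons item rest ih =>
    have hx : (xor state (item == "flick")) = (if (item == "flick") = true then !state else state) := by
      cases (item == "flick") <;> cases state <;> rfl
    have hhead : ∀ (b : Bool) (l : List Bool),
        List.scanl (fun s f => xor s f) b l = b :: (List.scanl (fun s f => xor s f) b l).tail := by
      intro b l; cases l <;> simp [List.scanl_cons]
    simp only [List.map_cons, List.scanl_cons, List.tail_cons, flickLoop]
    rw [hhead, ih (xor state (item == "flick")), hx]

theorem flick_switch_spec : Claim_equal_flick_switch := by
  intro lst _
  unfold Spec_flick_switch flick_switch flick_switch_alt
  exact (scan_eq_loop true lst).symm
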